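-- pv_equiv track=rewrite | github.com/vbdi/ptl | src/utils.py | hacky_eval_batch_optimizer
-- ===== SOURCE A (Python) =====
-- def hacky_eval_batch_optimizer(eval_dataset_size, max_batch, num_gpus):
--     # necessary bc we lose last batch of data
--     def remainder(x):
--         return eval_dataset_size % (num_gpus * x)
--
--     mods = [(i, remainder(i)) for i in range(16, max_batch)]
--     min_remainder = min(mods, key=lambda x: x[1])[1]  # Find the minimum remainder
--     mods = [tup for tup in mods if tup[1] == min_remainder]
--     max_batch = max(mods, key=lambda x: x[0])[0]  # Find the maximum batch w/ that remainder
--     return max_batch, min_remainder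
-- ===== SOURCE B (Python) =====
-- def hacky_eval_batch_optimizer(eval_dataset_size, max_batch, num_gpus):
--     # single linear scan: keep the best (batch, remainder) seen so far,
--     # '<=' so the largest batch with the minimal remainder wins
--     best_batch = None
--     best_remainder = None
--     for i in range(16, max_batch):
--         rem = eval_dataset_size % (num_gpus * i)
--         if best_remainder is None or rem <= best_remainder:
--             best_batch, best_remainder = i, rem
--     if best_remainder is None:
--         raise ValueError("empty batch-size range")
--     return best_batch, best_remainder
-- ===== Notes on version B (the rewrite author's own statement) =====
-- stated objective: simpler
-- what changed: Replaced the three-pass pipeline (build all (i,remainder) pairs, min by remainder, filter, max by batch) with a single linear scan keeping only the best (batch, remainder) pair, ties broken toward the larger batch via <=.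
import Mathlib
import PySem

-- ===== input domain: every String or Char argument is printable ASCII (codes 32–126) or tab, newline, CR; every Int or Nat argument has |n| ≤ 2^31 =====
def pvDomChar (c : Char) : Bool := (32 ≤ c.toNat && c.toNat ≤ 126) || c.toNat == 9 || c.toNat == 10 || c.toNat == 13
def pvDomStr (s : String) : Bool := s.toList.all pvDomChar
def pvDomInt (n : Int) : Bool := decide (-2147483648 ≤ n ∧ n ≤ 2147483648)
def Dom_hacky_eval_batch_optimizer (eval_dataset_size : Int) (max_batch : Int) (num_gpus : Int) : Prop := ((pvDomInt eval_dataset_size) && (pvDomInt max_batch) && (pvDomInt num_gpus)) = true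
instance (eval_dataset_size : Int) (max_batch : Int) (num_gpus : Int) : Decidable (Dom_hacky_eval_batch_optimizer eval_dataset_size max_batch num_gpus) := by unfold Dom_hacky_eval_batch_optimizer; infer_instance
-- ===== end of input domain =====

-- B replaces A's three passes (build all pairs, min by remainder, filter, max by batch)
-- with one linear scan keeping the best (batch, remainder) pair; simpler, O(1) extra space.

-- ===== PORT A =====
def hacky_eval_batch_optimizer (eval_dataset_size : Int) (max_batch : Int) (num_gpus : Int) : Int × Int :=
  let mods := (PySem.List.pyRange 16 max_batch 1).map
    (fun i => (i, PySem.Int.mod eval_dataset_size (num_gpus * i)))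
  let min_remainder := ((PySem.List.min? mods (fun x => x.2)).getD (0, 0)).2
  let mods2 := mods.filter (fun tup => tup.2 == min_remainder)
  let max_b := ((PySem.List.max? mods2 (fun x => x.1)).getD (0, 0)).1
  (max_b, min_remainder)

-- ===== PORT B =====
def hacky_eval_batch_optimizer_alt (eval_dataset_size : Int) (max_batch : Int) (num_gpus : Int) : Int × Int :=
  let best := (PySem.List.pyRange 16 max_batch 1).foldl
    (fun (best : Option (Int × Int)) i =>
      let rem := PySem.Int.mod eval_dataset_size (num_gpus * i)
      match best with
      | none => some (i, rem)
      | some (bb, br) => if rem ≤ br then some (i, rem) else some (bb, br))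
    none
  best.getD (0, 0)   -- Python raises ValueError when best is None; Pre_ excludes that case

-- ===== PRECONDITION & SPEC =====
-- Pre_ excludes exactly the inputs where Python A raises: max_batch ≤ 16 gives an empty
-- range (min() raises ValueError, B raises too) and num_gpus = 0 gives ZeroDivisionError.
def Pre_hacky_eval_batch_optimizer (eval_dataset_size : Int) (max_batch : Int) (num_gpus : Int) : Prop :=
  17 ≤ max_batch ∧ num_gpus ≠ 0
instance (eval_dataset_size : Int) (max_batch : Int) (num_gpus : Int) : Decidable (Pre_hacky_eval_batch_optimizer eval_dataset_size max_batch num_gpus) := by unfold Pre_hacky_eval_batch_optimizer; infer_instance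
def pvWitness_hacky_eval_batch_optimizer : Int × Int × Int := (1000, 40, 2)

def Spec_hacky_eval_batch_optimizer (eval_dataset_size : Int) (max_batch : Int) (num_gpus : Int) (out : Int × Int) : Prop := out = hacky_eval_batch_optimizer_alt eval_dataset_size max_batch num_gpus
instance (eval_dataset_size : Int) (max_batch : Int) (num_gpus : Int) (out : Int × Int) : Decidable (Spec_hacky_eval_batch_optimizer eval_dataset_size max_batch num_gpus out) := by unfold Spec_hacky_eval_batch_optimizer; infer_instance

-- ===== CLAIM =====
def Claim_equal_hacky_eval_batch_optimizer : Prop := ∀ (eval_dataset_size : Int) (max_batch : Int) (num_gpus : Int), Dom_hacky_eval_batch_optimizer eval_dataset_size max_batch num_gpus → Pre_hacky_eval_batch_optimizer eval_dataset_size max_batch num_gpus → Spec_hacky_eval_batch_optimizer eval_dataset_size max_batch num_gpus (hacky_eval_batch_optimizer eval_dataset_size max_batch num_gpus)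

-- ===== LEMMAS AND PROOFS =====

-- B's loop body, with and without the Option wrapper
def pvStep (f : Int → Int) (s : Int × Int) (i : Int) : Int × Int :=
  if f i ≤ s.2 then (i, f i) else s

def pvOStep (f : Int → Int) (o : Option (Int × Int)) (i : Int) : Option (Int × Int) :=
  let rem := f i
  match o with
  | none => some (i, rem)
  | some (bb, br) => if rem ≤ br then some (i, rem) else some (bb, br)

theorem pvFoldl_some (f : Int → Int) : ∀ (l : List Int) (b r : Int),
    l.foldl (pvOStep f) (some (b, r)) = some (l.foldl (pvStep f) (b, r)) := by
  intro l
  induction l with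
  | nil => intro b r; simp
  | cons i t ih =>
      intro b r
      simp only [List.foldl_cons, pvOStep, pvStep]
      by_cases h : f i ≤ r <;> simp [h, ih]

theorem pvFoldl_none (f : Int → Int) (l : List Int) (i : Int) :
    (i :: l).foldl (pvOStep f) none = some (l.foldl (pvStep f) (i, f i)) := by
  simp only [List.foldl_cons]
  have h0 : pvOStep f none i = some (i, f i) := rfl
  rw [h0, pvFoldl_some]

theorem pvFoldlMin_le (l : List Int) : ∀ a : Int, l.foldl min a ≤ a := by
  induction l with
  | nil => intro a; simp
  | cons x t ih =>
      intro a
      simp only [List.foldl_cons]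
      exact le_trans (ih (min a x)) (min_le_left a x)

theorem pvFoldlMin_le_mem (l : List Int) : ∀ (a y : Int), y ∈ l → l.foldl min a ≤ y := by
  induction l with
  | nil => intro a y hy; simp at hy
  | cons x t ih =>
      intro a y hy
      simp only [List.foldl_cons]
      rcases List.mem_cons.mp hy with h | h
      · rw [h]; exact le_trans (pvFoldlMin_le t (min a x)) (min_le_right a x)
      · exact ih (min a x) y h

theorem pvFoldlMin_mem (l : List Int) : ∀ a : Int, l.foldl min a = a ∨ l.foldl min a ∈ l := by
  induction l with
  | nil => intro a; simp
  | cons x t ih =>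
      intro a
      simp only [List.foldl_cons]
      rcases ih (min a x) with h | h
      · rcases min_cases a x with ⟨hm, _⟩ | ⟨hm, _⟩
        · exact Or.inl (h.trans hm)
        · exact Or.inr (by rw [h, hm]; exact List.mem_cons_self)
      · exact Or.inr (List.mem_cons_of_mem x h)

theorem pvStep_spec (f : Int → Int) : ∀ (l : List Int) (b r : Int),
    l.foldl (pvStep f) (b, r) =
      (((l.filter (fun i => f i == (l.map f).foldl min r)).getLast?).getD b,
        (l.map f).foldl min r) := by
  intro l
  induction l with
  | nil => intro b r; simp
  | cons i t ih =>
      intro b r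
      simp only [List.foldl_cons, List.map_cons, List.filter_cons]
      by_cases h : f i ≤ r
      · have hstep : pvStep f (b, r) i = (i, f i) := by simp [pvStep, h]
        have hmin : min r (f i) = f i := min_eq_right h
        rw [hstep, hmin, ih i (f i)]
        by_cases he : f i = (t.map f).foldl min (f i)
        · simp only [← he, beq_self_eq_true, if_pos]
          rw [List.getLast?_cons, Option.getD_some]
        · have hne : (f i == (t.map f).foldl min (f i)) = false := by
            simp [he]
          rw [hne, if_neg (by simp)]
          have hmem : (t.map f).foldl min (f i) ∈ t.map f := by
            rcases pvFoldlMin_mem (t.map f) (f i) with h1 | h1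
            · exact absurd h1.symm he
            · exact h1
          obtain ⟨j, hj, hfj⟩ := List.mem_map.mp hmem
          have hflt : j ∈ t.filter (fun k => f k == (t.map f).foldl min (f i)) :=
            List.mem_filter.mpr ⟨hj, by simp [hfj]⟩
          rcases hlast : (t.filter (fun k => f k == (t.map f).foldl min (f i))).getLast? with _ | x
          · rw [List.getLast?_eq_none_iff] at hlast
            rw [hlast] at hflt; simp at hflt
          · simp
      · have hstep : pvStep f (b, r) i = (b, r) := by simp [pvStep, h]
        have hmin : min r (f i) = r := min_eq_left (le_of_not_ge h)
        have hlt : (t.map f).foldl min r < f i :=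
          lt_of_le_of_lt (pvFoldlMin_le (t.map f) r) (lt_of_not_ge h)
        have hne : (f i == (t.map f).foldl min r) = false := by
          simp; omega
        rw [hstep, hmin, hne, if_neg (by simp), ih b r]

theorem pvLast_max : ∀ (xs : List Int), xs.Pairwise (· < ·) →
    ∀ j ∈ xs, ∀ L, xs.getLast? = some L → j ≤ L := by
  intro xs
  induction xs with
  | nil => intro _ j hj; simp at hj
  | cons x t ih =>
      intro hp j hj L hL
      cases t with
      | nil =>
          simp at hL hj; omega
      | cons y t' =>
          have hL' : (y :: t').getLast? = some L := by
            simp only [List.getLast?_cons, Option.getD_some, Option.some.injEq] at hL ⊢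
            exact hL
          have hLt : L ∈ y :: t' := List.mem_of_getLast? hL'
          rcases List.mem_cons.mp hj with h1 | h1
          · subst h1
            exact le_of_lt ((List.pairwise_cons.mp hp).1 L hLt)
          · exact ih (List.pairwise_cons.mp hp).2 j h1 L hL'

theorem hacky_eval_batch_optimizer_spec : Claim_equal_hacky_eval_batch_optimizer := by
  intro e mb g _ hpre
  obtain ⟨hmb, hg⟩ := hpre
  unfold Spec_hacky_eval_batch_optimizer
  set f : Int → Int := fun i => PySem.Int.mod e (g * i) with hf
  have hcons : PySem.List.pyRange 16 mb 1 = 16 :: PySem.List.pyRange 17 mb 1 := by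
    have h := PySem.List.pyRange_one_cons (a := 16) (b := mb) (by omega)
    norm_num at h
    exact h
  have hB : hacky_eval_batch_optimizer_alt e mb g
      = ((PySem.List.pyRange 16 mb 1).foldl (pvOStep f) none).getD (0, 0) := rfl
  have hstep16 : (PySem.List.pyRange 17 mb 1).foldl (pvStep f) (16, f 16)
      = (16 :: PySem.List.pyRange 17 mb 1).foldl (pvStep f) (16, f 16) := by
    rw [List.foldl_cons]
    simp [pvStep]
  have hBv : hacky_eval_batch_optimizer_alt e mb g
      = (((PySem.List.pyRange 16 mb 1).filter
            (fun i => f i == ((PySem.List.pyRange 16 mb 1).map f).foldl min (f 16))).getLast?.getD 16,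
         ((PySem.List.pyRange 16 mb 1).map f).foldl min (f 16)) := by
    rw [hB, hcons, pvFoldl_none, Option.getD_some, hstep16, ← hcons, pvStep_spec]
  set l := PySem.List.pyRange 16 mb 1 with hldef
  set m := (l.map f).foldl min (f 16) with hmdef
  set lf := l.filter (fun i => f i == m) with hlfdef
  -- facts about m
  have h16l : (16 : Int) ∈ l := by rw [hcons]; exact List.mem_cons_self
  have hm_le : ∀ j ∈ l, m ≤ f j := by
    intro j hj
    exact pvFoldlMin_le_mem (l.map f) (f 16) (f j) (List.mem_map_of_mem hj)
  have hm_att : ∃ j ∈ l, f j = m := by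
    rcases pvFoldlMin_mem (l.map f) (f 16) with h | h
    · exact ⟨16, h16l, h.symm⟩
    · obtain ⟨j, hj, hfj⟩ := List.mem_map.mp h
      exact ⟨j, hj, hfj⟩
  obtain ⟨j1, hj1, hfj1⟩ := hm_att
  -- A-side: the min? step
  have hmodsne : l.map (fun i => (i, f i)) ≠ [] := by
    rw [hcons]; simp
  obtain ⟨y, hy⟩ : ∃ y, PySem.List.min? (l.map (fun i => (i, f i))) (fun x => x.2) = some y := by
    rcases hmin : PySem.List.min? (l.map (fun i => (i, f i))) (fun x => x.2) with _ | y
    · exact absurd ((PySem.List.min?_eq_none_iff _ _).mp hmin) hmodsne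
    · exact ⟨y, rfl⟩
  have hymem : y ∈ l.map (fun i => (i, f i)) := PySem.List.min?_mem hy
  obtain ⟨jy, hjy, hyeq⟩ := List.mem_map.mp hymem
  have hymin : ∀ w ∈ l.map (fun i => (i, f i)), y.2 ≤ w.2 := PySem.List.min?_isMin hy
  have hmn : y.2 = m := by
    apply le_antisymm
    · have := hymin (j1, f j1) (List.mem_map_of_mem hj1)
      simpa [hfj1] using this
    · have h2 : y.2 = f jy := by rw [← hyeq]
      rw [h2]
      exact hm_le jy hjy
  -- the filtered list of pairs is lf mapped to pairs
  have hfilt : (l.map (fun i => (i, f i))).filter (fun tup => tup.2 == y.2)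
      = lf.map (fun i => (i, f i)) := by
    rw [hmn, hlfdef, List.filter_map]
    rfl
  -- lf is nonempty, strictly increasing, with last element L bounding it
  have hj1f : j1 ∈ lf := List.mem_filter.mpr ⟨hj1, by simp [hfj1]⟩
  have hlfne : lf ≠ [] := fun h => by rw [h] at hj1f; simp at hj1f
  obtain ⟨L, hL⟩ : ∃ L, lf.getLast? = some L := by
    rcases hlast : lf.getLast? with _ | L
    · exact absurd (List.getLast?_eq_none_iff.mp hlast) hlfne
    · exact ⟨L, rfl⟩
  have hLmem : L ∈ lf := List.mem_of_getLast? hL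
  have hpw : lf.Pairwise (· < ·) :=
    (PySem.List.pairwise_lt_pyRange_one (a := 16) (b := mb)).sublist List.filter_sublist
  have hLmax : ∀ j ∈ lf, j ≤ L := fun j hj => pvLast_max lf hpw j hj L hL
  -- A-side: the max? step
  have hmods2ne : lf.map (fun i => (i, f i)) ≠ [] := by simpa using hlfne
  obtain ⟨z, hz⟩ : ∃ z, PySem.List.max? (lf.map (fun i => (i, f i))) (fun x => x.1) = some z := by
    rcases hmax : PySem.List.max? (lf.map (fun i => (i, f i))) (fun x => x.1) with _ | z
    · exact absurd ((PySem.List.max?_eq_none_iff _ _).mp hmax) hmods2ne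
    · exact ⟨z, rfl⟩
  have hzmem : z ∈ lf.map (fun i => (i, f i)) := PySem.List.max?_mem hz
  obtain ⟨jz, hjz, hzeq⟩ := List.mem_map.mp hzmem
  have hzmax : ∀ w ∈ lf.map (fun i => (i, f i)), w.1 ≤ z.1 := PySem.List.max?_isMax hz
  have hz1 : z.1 = L := by
    apply le_antisymm
    · rw [← hzeq]; exact hLmax jz hjz
    · have := hzmax (L, f L) (List.mem_map_of_mem hLmem)
      simpa using this
  -- put A together
  show hacky_eval_batch_optimizer e mb g = _
  rw [hBv]
  have hlam : (fun i => (i, PySem.Int.mod e (g * i))) = (fun i => (i, f i)) := rfl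
  simp only [hacky_eval_batch_optimizer, ← hldef]
  rw [hlam, hy, Option.getD_some, hfilt, hz, Option.getD_some, hz1, hmn, hL, Option.getD_some]
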